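-- pv_equiv track=rewrite | github.com/anupam312nwd/Algorithms | Topics/array/monotonic_stack.py | monotonic_previous_greater
-- ===== SOURCE A (Python) =====
-- def monotonic_previous_greater(array):
--     stack = []
--     result = [-1] * len(array)
--     for i in range(len(array) - 1, -1, -1):
--         while stack and array[stack[-1]] < array[i]:
--             result[stack[-1]] = stack[-1] - i
--             stack.pop()
--         stack.append(i)
--     return result
-- ===== SOURCE B (Python) =====
-- def monotonic_previous_greater(array):
--     def scan(i):
--         for j in range(i - 1, -1, -1):
--             if array[j] > array[i]:
--                 return i - j
--         return -1
--     return [scan(i) for i in range(len(array))]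
-- ===== Notes on version B (the rewrite author's own statement) =====
-- stated objective: simpler
-- what changed: Replaces the right-to-left monotonic-stack sweep (stack of pending indices, results filled on pops) by a direct per-index backward rescan that returns the distance to the first strictly greater element on the left.
import Mathlib
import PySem

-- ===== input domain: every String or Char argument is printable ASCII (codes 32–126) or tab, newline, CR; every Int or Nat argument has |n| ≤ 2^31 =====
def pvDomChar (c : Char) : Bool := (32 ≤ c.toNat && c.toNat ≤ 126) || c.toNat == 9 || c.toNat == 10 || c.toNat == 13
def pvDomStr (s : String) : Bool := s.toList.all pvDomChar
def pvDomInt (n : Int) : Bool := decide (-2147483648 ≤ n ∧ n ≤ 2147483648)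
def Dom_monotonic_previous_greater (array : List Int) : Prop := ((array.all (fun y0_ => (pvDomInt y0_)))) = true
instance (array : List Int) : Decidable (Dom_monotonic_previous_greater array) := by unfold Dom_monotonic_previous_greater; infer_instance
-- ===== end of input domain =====

-- B replaces the right-to-left monotonic stack by a plain per-index backward rescan
-- (objective: simpler; B is O(n^2) where A is O(n) — no speed claim).

-- ===== PORT A =====
-- the inner `while stack and array[stack[-1]] < array[i]` loop (stack head = Python stack[-1])
def popA (array : List Int) (i : Nat) : List Nat → List Int → List Nat × List Int
  | [], res => ([], res)
  | s :: st, res =>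
    if array.getD s 0 < array.getD i 0 then
      popA array i st (res.set s ((s : Int) - (i : Int)))
    else (s :: st, res)

-- the outer `for i in range(len(array)-1, -1, -1)` loop; `goA array (i+1)` processes index i next
def goA (array : List Int) : Nat → List Nat → List Int → List Int
  | 0, _, res => res
  | i + 1, st, res =>
      let p := popA array i st res
      goA array i (i :: p.1) p.2

def monotonic_previous_greater (array : List Int) : List Int :=
  goA array array.length [] (List.replicate array.length (-1))

-- ===== PORT B =====
-- `for j in range(i-1, -1, -1): if array[j] > array[i]: return i - j` / `return -1`
def scanB (array : List Int) (i : Nat) : Nat → Int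
  | 0 => -1
  | j + 1 => if array.getD i 0 < array.getD j 0 then (i : Int) - (j : Int) else scanB array i j

def monotonic_previous_greater_alt (array : List Int) : List Int :=
  (List.range array.length).map (fun i => scanB array i i)

-- ===== PRECONDITION & SPEC =====
def Spec_monotonic_previous_greater (array : List Int) (out : List Int) : Prop := out = monotonic_previous_greater_alt array
instance (array : List Int) (out : List Int) : Decidable (Spec_monotonic_previous_greater array out) := by unfold Spec_monotonic_previous_greater; infer_instance

-- ===== CLAIM (what is proved, stated in full; the proofs are below) =====
def Claim_equal_monotonic_previous_greater : Prop := ∀ (array : List Int), Dom_monotonic_previous_greater array → Spec_monotonic_previous_greater array (monotonic_previous_greater array)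

-- ===== LEMMAS AND PROOFS =====

-- scan bounded below by lo: walk j = fuel-1, fuel-2, …, stop at the first j ≥ lo with g s < g j
def scanL (array : List Int) (s lo : Nat) : Nat → Int
  | 0 => -1
  | j + 1 =>
    if j < lo then -1
    else if array.getD s 0 < array.getD j 0 then (s : Int) - (j : Int)
    else scanL array s lo j

-- membership predicate of the monotonic stack: j survives iff nothing in [i, j) exceeds it
def predG (array : List Int) (i j : Nat) : Bool :=
  (List.range' i (j - i)).all (fun k => decide (array.getD k 0 ≤ array.getD j 0))

-- closed form of the stack after indices i … n-1 have been processed (head = top)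
def goodL (array : List Int) (i n : Nat) : List Nat :=
  (List.range' i (n - i)).filter (predG array i)

-- closed form of the result list after indices i … n-1 have been processed
def resL (array : List Int) (i n : Nat) : List Int :=
  (List.range n).map (fun s => scanL array s i s)

theorem scanL_zero (array : List Int) (s : Nat) : ∀ fuel, scanL array s 0 fuel = scanB array s fuel := by
  intro fuel
  induction fuel with
  | zero => rfl
  | succ j ih => simp [scanL, scanB, ih]

theorem scanL_none (array : List Int) (s lo : Nat) :
    ∀ fuel, (∀ k, lo ≤ k → k < fuel → ¬ array.getD s 0 < array.getD k 0) → scanL array s lo fuel = -1 := by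
  intro fuel
  induction fuel with
  | zero => intro _; rfl
  | succ j ih =>
    intro h
    by_cases hj : j < lo
    · simp only [scanL, if_pos hj]
    · have hg : ¬ array.getD s 0 < array.getD j 0 := h j (by omega) (by omega)
      simp only [scanL, if_neg hj, if_neg hg]
      exact ih (fun k hk hk' => h k hk (by omega))

theorem scanL_found (array : List Int) (s lo : Nat) :
    ∀ fuel, lo < fuel → array.getD s 0 < array.getD lo 0 →
      (∀ k, lo < k → k < fuel → ¬ array.getD s 0 < array.getD k 0) →
      scanL array s lo fuel = (s : Int) - (lo : Int) := by
  intro fuel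
  induction fuel with
  | zero => omega
  | succ j ih =>
    intro hlt hg h
    by_cases hj : j = lo
    · subst hj
      simp only [scanL, if_neg (lt_irrefl j), if_pos hg]
    · have h1 : ¬ j < lo := by omega
      have h2 : ¬ array.getD s 0 < array.getD j 0 := h j (by omega) (by omega)
      simp only [scanL, if_neg h1, if_neg h2]
      exact ih (by omega) hg (fun k hk hk' => h k hk (by omega))

theorem scanL_lower (array : List Int) (s lo : Nat) :
    ∀ fuel, (∃ k, lo + 1 ≤ k ∧ k < fuel ∧ array.getD s 0 < array.getD k 0) →
      scanL array s lo fuel = scanL array s (lo + 1) fuel := by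
  intro fuel
  induction fuel with
  | zero => intro _; rfl
  | succ j ih =>
    rintro ⟨k, hk1, hk2, hk3⟩
    have h1 : ¬ j < lo := by omega
    have h2 : ¬ j < lo + 1 := by omega
    by_cases hg : array.getD s 0 < array.getD j 0
    · simp only [scanL, if_neg h1, if_neg h2, if_pos hg]
    · simp only [scanL, if_neg h1, if_neg h2, if_neg hg]
      exact ih ⟨k, hk1, by
        have : k ≠ j := fun h => by subst h; exact hg hk3
        omega, hk3⟩

-- the stack values are nondecreasing from the top, so the popped set is a prefix
theorem filter_split_of_prefix {α : Type} (p : α → Bool) :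
    ∀ l : List α, l.Pairwise (fun a b => p b → p a) →
      l = l.filter p ++ l.filter (fun x => ! p x) := by
  intro l
  induction l with
  | nil => intro _; rfl
  | cons a l ih =>
    intro hp
    rcases List.pairwise_cons.mp hp with ⟨ha, hl⟩
    by_cases hpa : p a
    · simp [hpa]
      exact ih hl
    · have hall : ∀ b ∈ l, ¬ p b = true := fun b hb hpb => hpa (ha b hb hpb)
      have h1 : l.filter p = [] := List.filter_eq_nil_iff.mpr hall
      have h2 : l.filter (fun x => ! p x) = l := List.filter_eq_self.mpr (by
        intro b hb; simp [hall b hb])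
      simp [hpa, h1, h2]

theorem mem_goodL {array : List Int} {i n j : Nat} (h : j ∈ goodL array i n) :
    i ≤ j ∧ j < n ∧ ∀ k, i ≤ k → k < j → array.getD k 0 ≤ array.getD j 0 := by
  rcases List.mem_filter.mp h with ⟨hr, hp⟩
  rcases List.mem_range'_1.mp hr with ⟨h1, h2⟩
  refine ⟨h1, by omega, ?_⟩
  intro k hk1 hk2
  have := List.all_eq_true.mp hp k (List.mem_range'_1.mpr ⟨hk1, by omega⟩)
  simpa using this

theorem goodL_pairwise_le (array : List Int) (i n : Nat) :
    (goodL array i n).Pairwise (fun a b => array.getD a 0 ≤ array.getD b 0) := by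
  have hlt : (goodL array i n).Pairwise (· < ·) :=
    List.Pairwise.filter _ List.pairwise_lt_range'
  refine List.Pairwise.imp_of_mem ?_ hlt
  intro a b ha hb hab
  exact (mem_goodL hb).2.2 a (mem_goodL ha).1 hab

-- the inner while-loop pops exactly a prefix P of smaller-valued entries
theorem popA_spec (array : List Int) (i : Nat) :
    ∀ P K res, (∀ j ∈ P, array.getD j 0 < array.getD i 0) →
      (∀ s ∈ K.head?, ¬ array.getD s 0 < array.getD i 0) →
      popA array i (P ++ K) res =
        (K, P.foldl (fun r j => r.set j ((j : Int) - (i : Int))) res) := by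
  intro P
  induction P with
  | nil =>
    intro K res _ hK
    cases K with
    | nil => rfl
    | cons s K =>
      have hs : ¬ array.getD s 0 < array.getD i 0 := hK s (by simp)
      simp only [List.nil_append, popA, if_neg hs, List.foldl_nil]
  | cons a P ih =>
    intro K res hP hK
    have ha : array.getD a 0 < array.getD i 0 := hP a (by simp)
    simp only [List.cons_append, popA, if_pos ha, List.foldl_cons]
    exact ih K _ (fun j hj => hP j (by simp [hj])) hK

-- setting result cells at a nodup index set P
theorem foldl_set_not_mem (f : Nat → Int) :
    ∀ (P : List Nat) (res : List Int) (s : Nat), s ∉ P →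
      (P.foldl (fun r j => r.set j (f j)) res).getD s 0 = res.getD s 0 := by
  intro P
  induction P with
  | nil => intro res s _; rfl
  | cons a P ih =>
    intro res s hs
    have hsa : s ≠ a := fun h => hs (by simp [h])
    rw [List.foldl_cons, ih _ s (fun h => hs (by simp [h]))]
    simp [List.getD, List.getElem?_set_ne (fun h => hsa h.symm)]

theorem foldl_set_mem (f : Nat → Int) :
    ∀ (P : List Nat) (res : List Int) (s : Nat), P.Nodup → s ∈ P → s < res.length →
      (P.foldl (fun r j => r.set j (f j)) res).getD s 0 = f s := by
  intro P
  induction P with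
  | nil => intro res s _ h; simp at h
  | cons a P ih =>
    intro res s hnd hs hlen
    rcases List.mem_cons.mp hs with h | h
    · subst h
      have hsP : s ∉ P := (List.nodup_cons.mp hnd).1
      rw [List.foldl_cons, foldl_set_not_mem f P _ s hsP]
      simp [List.getD, hlen]
    · exact List.foldl_cons .. ▸ ih _ s (List.nodup_cons.mp hnd).2 h (by simpa)

theorem goodL_top (array : List Int) {i n : Nat} (h : i < n) :
    goodL array i n = i :: ((goodL array (i + 1) n).filter
      (fun j => decide (array.getD i 0 ≤ array.getD j 0))) := by
  unfold goodL
  have hni : n - i = (n - (i + 1)) + 1 := by omega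
  rw [hni, List.range'_succ, List.filter_cons]
  have hpi : predG array i i = true := by simp [predG]
  rw [if_pos hpi, List.filter_filter]
  congr 1
  apply List.filter_congr
  intro j hj
  rcases List.mem_range'_1.mp hj with ⟨hj1, _⟩
  unfold predG
  have hsplit : j - i = (j - (i + 1)) + 1 := by omega
  rw [hsplit, List.range'_succ, List.all_cons]

theorem foldl_set_length (f : Nat → Int) :
    ∀ (P : List Nat) (res : List Int),
      (P.foldl (fun r j => r.set j (f j)) res).length = res.length := by
  intro P
  induction P with
  | nil => intro res; rfl
  | cons a P ih => intro res; rw [List.foldl_cons, ih]; simp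

theorem resL_getD (array : List Int) {i n s : Nat} (hs : s < n) :
    (resL array i n).getD s 0 = scanL array s i s := by
  unfold resL
  rw [List.getD_eq_getElem?_getD]
  simp [hs]

theorem scanL_small (array : List Int) {s lo : Nat} (h : s ≤ lo) :
    scanL array s lo s = -1 :=
  scanL_none array s lo s (fun k hk hk' => by omega)

-- the running result has the scanL closed form after the step
theorem resL_step (array : List Int) {i n : Nat} (hin : i < n) :
    resL array i n =
      ((goodL array (i + 1) n).filter (fun j => decide (array.getD j 0 < array.getD i 0))).foldl
        (fun r j => r.set j ((j : Int) - (i : Int))) (resL array (i + 1) n) := by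
  set p := fun j => decide (array.getD j 0 < array.getD i 0) with hp
  set P := (goodL array (i + 1) n).filter p with hPdef
  have hPnd : P.Nodup := by
    apply List.Nodup.filter
    apply List.Nodup.filter
    exact List.Pairwise.imp Nat.ne_of_lt List.pairwise_lt_range'
  have hlen : (resL array (i + 1) n).length = n := by simp [resL]
  have key : ∀ s, s < n → scanL array s i s =
      (P.foldl (fun r j => r.set j ((j : Int) - (i : Int))) (resL array (i + 1) n)).getD s 0 := by
    intro s hs
    by_cases hsP : s ∈ P
    · -- popped entry: result becomes s - i, and the rescan finds i
      have hmem : s ∈ goodL array (i+1) n := (List.mem_filter.mp hsP).1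
      have hps : array.getD s 0 < array.getD i 0 := by
        have := (List.mem_filter.mp hsP).2; simpa [hp] using this
      rcases mem_goodL hmem with ⟨h1, _, h3⟩
      rw [foldl_set_mem _ P _ s hPnd hsP (by omega)]
      apply scanL_found array s i s (by omega) hps
      intro k hk hk'
      have := h3 k (by omega) hk'
      omega
    · rw [foldl_set_not_mem _ P _ s hsP, resL_getD array hs]
      by_cases hsi : s ≤ i
      · rw [scanL_small array hsi, scanL_small array (by omega)]
      · by_cases hgood : ∀ k, i + 1 ≤ k → k < s → array.getD k 0 ≤ array.getD s 0
        · -- s stays on the stack: both scans find nothing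
          have hmem : s ∈ goodL array (i+1) n := by
            apply List.mem_filter.mpr
            refine ⟨List.mem_range'_1.mpr ⟨by omega, by omega⟩, ?_⟩
            unfold predG
            apply List.all_eq_true.mpr
            intro k hk
            rcases List.mem_range'_1.mp hk with ⟨hk1, hk2⟩
            simp only [decide_eq_true_eq]
            exact hgood k hk1 (by omega)
          have hnps : ¬ array.getD s 0 < array.getD i 0 := by
            intro hps
            exact hsP (List.mem_filter.mpr ⟨hmem, by simpa [hp] using hps⟩)
          rw [scanL_none array s i s, scanL_none array s (i+1) s]
          · intro k hk hk'
            have := hgood k hk hk'; omega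
          · intro k hk hk'
            rcases Nat.eq_or_lt_of_le hk with h | h
            · subst h; exact hnps
            · have := hgood k (by omega) hk'; omega
        · -- a greater element exists strictly between i and s: both scans stop there
          rcases not_forall.mp hgood with ⟨k, hk⟩
          rcases Classical.not_imp.mp hk with ⟨hk1, hk'⟩
          rcases Classical.not_imp.mp hk' with ⟨hk2, hk3⟩
          exact scanL_lower array s i s ⟨k, hk1, hk2, by omega⟩
  apply List.ext_getElem
  · rw [foldl_set_length]
    simp [resL]
  · intro s hs1 hs2
    have hsn : s < n := by simpa [resL] using hs1
    have hkey := key s hsn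
    rw [List.getD_eq_getElem?_getD, List.getElem?_eq_getElem hs2] at hkey
    simp only [resL, List.getElem_map, List.getElem_range]
    simpa using hkey

theorem main_inv (array : List Int) :
    ∀ i, i ≤ array.length →
      goA array i (goodL array i array.length) (resL array i array.length) =
        resL array 0 array.length := by
  intro i
  induction i with
  | zero => intro _; rfl
  | succ i ih =>
    intro h
    set n := array.length
    have hin : i < n := by omega
    -- split the stack into popped prefix P and kept suffix K
    set p := fun j => decide (array.getD j 0 < array.getD i 0) with hp
    set P := (goodL array (i+1) n).filter p with hPdef
    set K := (goodL array (i+1) n).filter (fun j => ! p j) with hKdef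
    have hsplit : goodL array (i+1) n = P ++ K := by
      apply filter_split_of_prefix
      refine (goodL_pairwise_le array (i+1) n).imp_of_mem ?_
      intro a b _ _ hab hpb
      simp only [hp, decide_eq_true_eq] at hpb ⊢
      omega
    have hpop : popA array i (goodL array (i+1) n) (resL array (i+1) n) =
        (K, P.foldl (fun r j => r.set j ((j : Int) - (i : Int))) (resL array (i+1) n)) := by
      rw [hsplit]
      apply popA_spec
      · intro j hj
        have := (List.mem_filter.mp hj).2
        simpa [hp] using this
      · intro s hs
        have : s ∈ K := by
          cases hK : K.head? with
          | none => simp [hK] at hs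
          | some a => simp [hK] at hs; subst hs; exact List.mem_of_mem_head? (by simp [hK])
        have := (List.mem_filter.mp this).2
        simpa [hp] using this
    have hK' : K = (goodL array (i+1) n).filter
        (fun j => decide (array.getD i 0 ≤ array.getD j 0)) := by
      rw [hKdef]
      apply List.filter_congr
      intro j _
      simp only [hp, ← decide_not, decide_eq_decide]
      omega
    rw [goA]
    simp only [hpop]
    rw [← resL_step array hin, hK', ← goodL_top array hin]
    exact ih (by omega)

theorem goodL_init (array : List Int) : goodL array array.length array.length = [] := by
  simp [goodL]

theorem resL_init (array : List Int) :
    resL array array.length array.length = List.replicate array.length (-1) := by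
  unfold resL
  apply List.ext_getElem
  · simp
  · intro s hs1 hs2
    simp only [List.getElem_map, List.getElem_range, List.getElem_replicate]
    apply scanL_none
    intro k hk hk'
    simp at hs1
    omega

theorem resL_final (array : List Int) : resL array 0 array.length = monotonic_previous_greater_alt array := by
  unfold resL monotonic_previous_greater_alt
  apply List.map_congr_left
  intro i _
  exact scanL_zero array i i

-- ===== VERDICT (by name: the statement is the Claim_ definition above) =====
theorem monotonic_previous_greater_spec : Claim_equal_monotonic_previous_greater := by
  intro array _
  unfold Spec_monotonic_previous_greater monotonic_previous_greater
  rw [← goodL_init array, ← resL_init array, main_inv array array.length (le_refl _),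
    resL_final]
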